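-- pv_equiv track=rewrite | github.com/asweigart/programmedpatterns | book/visualpatterns.py | pattern72
-- ===== SOURCE A (Python) =====
-- def pattern72(step):
--     width = 3
--     height = 2
--     for i in range(2, step + 1):
--         if i % 3 == 2:
--             width -= 1
--         elif i % 3 == 0:
--             width -= 1
--             height += 1
--         elif i % 3 == 1:
--             width += 2
--             height -= 1
--     row = ('O' * width) + '\n'
--     pattern = row * height
--     return pattern
-- ===== SOURCE B (Python) =====
-- def pattern72(step):
--     # Closed form: the loop's updates are periodic with period 3, so width/height
--     # depend only on step % 3 (for step >= 2; below 2 the loop never runs).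
--     if step >= 2 and step % 3 == 2:
--         width, height = 2, 2
--     elif step >= 2 and step % 3 == 0:
--         width, height = 1, 3
--     else:
--         width, height = 3, 2
--     return (('O' * width) + '\n') * height
-- ===== Notes on version B (the rewrite author's own statement) =====
-- stated objective: faster
-- what changed: Replaces the O(step) simulation loop with an O(1) closed form: the per-iteration updates cycle with period 3, so width/height are read off step % 3 directly.
import Mathlib
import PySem

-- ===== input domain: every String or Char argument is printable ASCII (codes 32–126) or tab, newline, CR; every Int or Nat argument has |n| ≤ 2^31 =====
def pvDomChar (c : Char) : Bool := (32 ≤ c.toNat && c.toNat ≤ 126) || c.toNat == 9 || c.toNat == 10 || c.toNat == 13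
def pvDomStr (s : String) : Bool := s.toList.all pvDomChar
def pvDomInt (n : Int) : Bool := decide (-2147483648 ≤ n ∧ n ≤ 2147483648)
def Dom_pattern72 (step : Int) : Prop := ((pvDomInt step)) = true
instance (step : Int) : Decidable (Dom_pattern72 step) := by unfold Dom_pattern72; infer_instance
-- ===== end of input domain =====

-- B replaces A's O(step) simulation loop by an O(1) closed form (the updates are periodic with period 3).


-- ===== PORT A =====
-- the loop body: one iteration of A's for-loop over (width, height)
def pattern72Step (s : Int × Int) (i : Int) : Int × Int :=
  if PySem.Int.mod i 3 = 2 then (s.1 - 1, s.2)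
  else if PySem.Int.mod i 3 = 0 then (s.1 - 1, s.2 + 1)
  else if PySem.Int.mod i 3 = 1 then (s.1 + 2, s.2 - 1)
  else s

-- 'O' * w and row * h: Python string repetition; negative count gives '' (Int.toNat clamps, exact here)
def pattern72 (step : Int) : String :=
  let wh := (PySem.List.pyRange 2 (step + 1) 1).foldl pattern72Step (3, 2)
  let row : List Char := List.replicate wh.1.toNat 'O' ++ ['\n']
  String.mk (List.replicate wh.2.toNat row).flatten

-- ===== PORT B =====
def pattern72_alt (step : Int) : String :=
  let wh : Int × Int :=
    if step ≥ 2 ∧ PySem.Int.mod step 3 = 2 then (2, 2)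
    else if step ≥ 2 ∧ PySem.Int.mod step 3 = 0 then (1, 3)
    else (3, 2)
  String.mk (List.replicate wh.2.toNat (List.replicate wh.1.toNat 'O' ++ ['\n'])).flatten

-- ===== PRECONDITION & SPEC =====
def Spec_pattern72 (step : Int) (out : String) : Prop := out = pattern72_alt step
instance (step : Int) (out : String) : Decidable (Spec_pattern72 step out) := by unfold Spec_pattern72; infer_instance

-- ===== CLAIM (what is proved, stated in full; the proofs are below) =====
def Claim_equal_pattern72 : Prop := ∀ (step : Int), Dom_pattern72 step → Spec_pattern72 step (pattern72 step)

-- ===== LEMMAS AND PROOFS =====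

-- Python's % with the positive divisor 3 is Int.emod
theorem pvMod3 (x : Int) : PySem.Int.mod x 3 = x % 3 := by
  simp [PySem.Int.mod, Int.fmod_eq_emod]

-- the loop's state after running up to step = 2 + n, as a function of (2+n) % 3
theorem pattern72_loop_closed (n : Nat) :
    (PySem.List.pyRange 2 (2 + (n : Int) + 1) 1).foldl pattern72Step (3, 2) =
      (if (2 + (n : Int)) % 3 = 2 then ((2 : Int), (2 : Int))
       else if (2 + (n : Int)) % 3 = 0 then (1, 3)
       else (3, 2)) := by
  induction n with
  | zero => decide
  | succ m ih =>
      have h1 : (2 : Int) ≤ 2 + (m : Int) + 1 := by omega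
      have hr : PySem.List.pyRange 2 (2 + (m : Int) + 1 + 1) 1
          = PySem.List.pyRange 2 (2 + (m : Int) + 1) 1 ++ [2 + (m : Int) + 1] :=
        PySem.List.pyRange_one_succ_right (a := 2) (b := 2 + (m : Int) + 1) h1
      push_cast
      rw [show (2 + ((m : Int) + 1) + 1) = 2 + (m : Int) + 1 + 1 by ring, hr,
        List.foldl_append, ih]
      simp only [List.foldl_cons, List.foldl_nil, pattern72Step, pvMod3]
      split_ifs <;> first | rfl | (exfalso; omega)

theorem pattern72_eq_alt (step : Int) : pattern72 step = pattern72_alt step := by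
  unfold pattern72 pattern72_alt
  by_cases h2 : step < 2
  · have : PySem.List.pyRange 2 (step + 1) 1 = [] :=
      PySem.List.pyRange_one_eq_nil (by omega)
    rw [this]
    have hm : ¬ (step ≥ 2 ∧ PySem.Int.mod step 3 = 2) := fun h => absurd h.1 (by omega)
    have hm0 : ¬ (step ≥ 2 ∧ PySem.Int.mod step 3 = 0) := fun h => absurd h.1 (by omega)
    rw [if_neg hm, if_neg hm0]
    rfl
  · obtain ⟨n, hn⟩ : ∃ n : Nat, step = 2 + (n : Int) := ⟨(step - 2).toNat, by omega⟩
    subst hn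
    rw [pattern72_loop_closed n]
    simp only [pvMod3]
    split_ifs <;> first | rfl | (exfalso; omega)

-- ===== VERDICT (by name: the statement is the Claim_ definition above) =====
theorem pattern72_spec : Claim_equal_pattern72 := by
  intro step _
  exact pattern72_eq_alt step
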